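-- pv_equiv track=rewrite | github.com/schuppnura/python-anonymization | anonymiser.py | build_index_map
-- ===== SOURCE A (Python) =====
-- import string
-- import unicodedata
-- from typing import Any, Dict, Iterable, List, Tuple, Optional
--
-- def build_index_map(original: str) -> Tuple[str, List[int]]:
--     """
--     Build a normalised surrogate and index map back to original.
--     Why: search in normalised space but convert back to original indices.
--     How: stream through chars; store original indices for each kept char.
--     """
--     norm_chars: List[str] = []
--     idx_map: List[int] = []
--     last_space = False
--     i = 0
--     while i < len(original):
--         ch = original[i]
--         d = unicodedata.normalize("NFKD", ch).encode("ascii", "ignore").decode("ascii")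
--         if len(d) == 0 or d in string.punctuation:
--             i += 1
--             continue
--         if d.isspace():
--             if not last_space:
--                 norm_chars.append(" ")
--                 idx_map.append(i)
--                 last_space = True
--         else:
--             norm_chars.append(d.casefold())
--             idx_map.append(i)
--             last_space = False
--         i += 1
--     return "".join(norm_chars).strip(), idx_map
-- ===== SOURCE B (Python) =====
-- import string
-- import unicodedata
-- from itertools import groupby
-- from typing import List, Tuple
--
--
-- def build_index_map(original: str) -> Tuple[str, List[int]]:
--     # Pass 1: normalize each char, keep (fragment, original index) for non-empty,
--     # non-punctuation fragments (same substring-style punctuation test as the spec).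
--     entries = []
--     for i, ch in enumerate(original):
--         d = unicodedata.normalize("NFKD", ch).encode("ascii", "ignore").decode("ascii")
--         if len(d) != 0 and d not in string.punctuation:
--             entries.append((d, i))
--     # Pass 2: collapse runs of whitespace fragments, keeping the first index of
--     # each run; casefold the rest.
--     norm_chars: List[str] = []
--     idx_map: List[int] = []
--     for is_space, grp in groupby(entries, key=lambda e: e[0].isspace()):
--         run = list(grp)
--         if is_space:
--             norm_chars.append(" ")
--             idx_map.append(run[0][1])
--         else:
--             for d, i in run:
--                 norm_chars.append(d.casefold())
--                 idx_map.append(i)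
--     return "".join(norm_chars).strip(), idx_map
-- ===== Notes on version B (the rewrite author's own statement) =====
-- stated objective: alternative
-- what changed: Replaces A's single while loop with an inline last_space flag by a two-pass shape: first build a list of (normalized fragment, index) entries filtering empty/punctuation fragments, then collapse whitespace runs with itertools.groupby keeping the first index of each run.
import Mathlib
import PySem

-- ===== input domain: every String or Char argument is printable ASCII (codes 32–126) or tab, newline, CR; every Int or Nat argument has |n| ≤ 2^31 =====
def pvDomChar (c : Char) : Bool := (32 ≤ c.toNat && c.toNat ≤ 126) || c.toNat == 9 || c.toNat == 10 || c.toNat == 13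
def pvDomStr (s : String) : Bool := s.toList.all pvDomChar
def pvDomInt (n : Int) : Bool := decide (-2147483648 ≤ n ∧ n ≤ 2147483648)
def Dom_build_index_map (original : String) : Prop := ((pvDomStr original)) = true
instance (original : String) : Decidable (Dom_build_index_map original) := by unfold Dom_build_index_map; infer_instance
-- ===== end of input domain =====

-- B replaces A's inline last_space state machine by a two-pass build-then-collapse
-- decomposition (normalize+filter into (fragment, index) entries, then group whitespace
-- runs); objective: alternative decomposition, same cost.


-- ===== PORT A =====
-- string.punctuation
def pvPunct : List Char := "!\"#$%&'()*+,-./:;<=>?@[\\]^_`{|}~".toList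

-- While loop of A, state = (norm_chars, idx_map, last_space, i).
-- `unicodedata.normalize("NFKD", ch).encode("ascii","ignore").decode("ascii")` is the
-- identity on the printable-ASCII (plus tab/newline/CR) domain Dom, so d = [ch] here.
-- `d in string.punctuation` is Python's substring test: PySem.Chars.isIn.
def buildLoopA : List Char → List Char → List Int → Bool → Int → List Char × List Int
  | [], nc, im, _, _ => (nc, im)
  | ch :: rest, nc, im, lastSpace, i =>
    let d : List Char := [ch]
    if d.length = 0 || PySem.Chars.isIn d pvPunct then
      buildLoopA rest nc im lastSpace (i + 1)
    else if PySem.Chars.strIsspace d then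
      if !lastSpace then buildLoopA rest (nc ++ [' ']) (im ++ [i]) true (i + 1)
      else buildLoopA rest nc im lastSpace (i + 1)
    else
      -- casefold = lower on the ASCII domain
      buildLoopA rest (nc ++ PySem.Chars.lower d) (im ++ [i]) false (i + 1)

def build_index_map (original : String) : String × List Int :=
  let r := buildLoopA original.toList [] [] false 0
  (String.ofList (PySem.Chars.strip r.1), r.2)

-- ===== PORT B =====
-- Pass 1: (fragment, index) entries for non-empty, non-punctuation fragments
-- (d = [ch] on Dom, exactly as in port A; enumerate ported as an Int counter).
def entriesB : List Char → Int → List (List Char × Int)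
  | [], _ => []
  | ch :: rest, i =>
    let d : List Char := [ch]
    if d.length ≠ 0 && !PySem.Chars.isIn d pvPunct then (d, i) :: entriesB rest (i + 1)
    else entriesB rest (i + 1)

-- Pass 2: itertools.groupby on "fragment is space", keeping the first index of each
-- whitespace run and casefolding (= lower on ASCII) the rest; ported as structural
-- recursion carrying whether the previous kept entry was a space run member.
def collapseB : List (List Char × Int) → Bool → List Char × List Int
  | [], _ => ([], [])
  | (d, i) :: rest, prevSpace =>
    if PySem.Chars.strIsspace d then
      let r := collapseB rest true
      if prevSpace then r else (' ' :: r.1, i :: r.2)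
    else
      let r := collapseB rest false
      (PySem.Chars.lower d ++ r.1, i :: r.2)

def build_index_map_alt (original : String) : String × List Int :=
  let c := collapseB (entriesB original.toList 0) false
  (String.ofList (PySem.Chars.strip c.1), c.2)

-- ===== PRECONDITION & SPEC =====
def Spec_build_index_map (original : String) (out : String × List Int) : Prop := out = build_index_map_alt original
instance (original : String) (out : String × List Int) : Decidable (Spec_build_index_map original out) := by unfold Spec_build_index_map; infer_instance

-- ===== CLAIM (what is proved, stated in full; the proofs are below) =====
def Claim_equal_build_index_map : Prop := ∀ (original : String), Dom_build_index_map original → Spec_build_index_map original (build_index_map original)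

-- ===== LEMMAS AND PROOFS =====

-- A's loop from any state equals B's collapse of the remaining entries, appended.
lemma loop_eq (cs : List Char) : ∀ (i : Int) (nc : List Char) (im : List Int) (last : Bool),
    buildLoopA cs nc im last i =
      (nc ++ (collapseB (entriesB cs i) last).1, im ++ (collapseB (entriesB cs i) last).2) := by
  induction cs with
  | nil => intro i nc im last; simp [buildLoopA, entriesB, collapseB]
  | cons ch rest ih =>
    intro i nc im last
    by_cases hp : PySem.Chars.isIn [ch] pvPunct = true
    · simp [buildLoopA, entriesB, hp, ih]
    · by_cases hs : PySem.Chars.strIsspace [ch] = true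
      · cases last <;> simp [buildLoopA, entriesB, collapseB, hp, hs, ih]
      · simp [buildLoopA, entriesB, collapseB, hp, hs, ih]

-- ===== VERDICT (by name: the statement is the Claim_ definition above) =====
theorem build_index_map_spec : Claim_equal_build_index_map := by
  intro original _
  unfold Spec_build_index_map build_index_map build_index_map_alt
  simp [loop_eq]
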